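-- pv_equiv track=rewrite | github.com/ThanhChuong12/Supervised-Learning-Regression-Classification | code/Part1_Regression/models.py | select_feature_groups
-- ===== SOURCE A (Python) =====
-- def select_feature_groups(names: list[str]) -> dict[str, list[int]]:
--     idx = {n: i for i, n in enumerate(names)}
--
--     def pick(prefix: str) -> list[int]:
--         return [i for n, i in idx.items() if n.startswith(prefix)]
--
--     groups: dict[str, list[int]] = {}
--     groups['lights'] = [idx['lights']] if 'lights' in idx else []
--     groups['temp_indoor'] = pick('T')
--     if 'T_out' in idx and idx['T_out'] in groups['temp_indoor']:
--         groups['temp_indoor'].remove(idx['T_out'])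
--         groups['temp_outdoor'] = [idx['T_out']]
--     else:
--         groups['temp_outdoor'] = []
--
--     groups['humidity'] = pick('RH_')
--     if 'RH_out' in idx:
--         groups['humidity_outdoor'] = [idx['RH_out']]
--     else:
--         groups['humidity_outdoor'] = []
--
--     for k in ['Press_mm_hg', 'Windspeed', 'Visibility', 'Tdewpoint', 'rv1', 'rv2']:
--         groups[k] = [idx[k]] if k in idx else []
--
--     return {g: cols for g, cols in groups.items() if len(cols) > 0}
-- ===== SOURCE B (Python) =====
-- def select_feature_groups(names: list[str]) -> dict[str, list[int]]:
--     idx = {}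
--     for i, n in enumerate(names):
--         idx[n] = i
--
--     lights, ti, to, hum, ho = [], [], [], [], []
--     for n, i in idx.items():
--         if n == 'lights':
--             lights.append(i)
--         if n.startswith('T'):
--             if n == 'T_out':
--                 to.append(i)
--             else:
--                 ti.append(i)
--         if n.startswith('RH_'):
--             hum.append(i)
--             if n == 'RH_out':
--                 ho.append(i)
--
--     out = {}
--     for g, cols in (('lights', lights), ('temp_indoor', ti),
--                     ('temp_outdoor', to), ('humidity', hum),
--                     ('humidity_outdoor', ho)):
--         if cols:
--             out[g] = cols
--     for k in ('Press_mm_hg', 'Windspeed', 'Visibility', 'Tdewpoint', 'rv1', 'rv2'):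
--         if k in idx:
--             out[k] = [idx[k]]
--     return out
-- ===== Notes on version B (the rewrite author's own statement) =====
-- stated objective: simpler
-- what changed: B drops A's groups dict, the pick() closure, the list .remove surgery and the final non-empty dict comprehension, instead making one bucket-appending pass over idx.items() and assembling only the non-empty groups directly (fixed single-key groups via plain lookups).
import Mathlib
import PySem

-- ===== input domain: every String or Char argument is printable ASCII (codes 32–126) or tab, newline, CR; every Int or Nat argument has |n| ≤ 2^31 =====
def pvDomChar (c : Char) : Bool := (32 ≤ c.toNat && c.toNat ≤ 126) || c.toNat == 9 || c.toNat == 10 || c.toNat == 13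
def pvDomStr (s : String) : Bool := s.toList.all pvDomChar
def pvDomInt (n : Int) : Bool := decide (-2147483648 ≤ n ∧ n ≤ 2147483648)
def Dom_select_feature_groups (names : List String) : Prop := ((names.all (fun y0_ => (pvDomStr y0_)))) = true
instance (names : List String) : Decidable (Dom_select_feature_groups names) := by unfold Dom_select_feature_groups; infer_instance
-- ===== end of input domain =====

-- B replaces A's dict of groups, the list `.remove` surgery and the final non-empty
-- comprehension by one bucket-appending pass over idx.items() plus a direct assembly
-- of the non-empty groups (objective: simpler; same asymptotic cost).

-- ===== PORT A =====
def select_feature_groups (names : List String) : List (String × List Int) :=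
  -- idx = {n: i for i, n in enumerate(names)}
  let idx : PySem.Dict String Int :=
    (PySem.List.enumerate names).foldl (fun d p => d.insert p.2 p.1) PySem.Dict.empty
  -- def pick(prefix): return [i for n, i in idx.items() if n.startswith(prefix)]
  let pick : String → List Int :=
    fun pre => (idx.items.filter (fun p => PySem.Str.startswith p.1 pre)).map (fun p => p.2)
  let lightsV : List Int := if idx.contains "lights" then [idx.getD "lights" 0] else []
  let ti := pick "T"
  let tout := idx.getD "T_out" 0
  -- the if/else mutating groups['temp_indoor'] and setting groups['temp_outdoor']:
  -- both final values are decided by the same guard (remove? is some under the guard)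
  let pr : List Int × List Int :=
    if idx.contains "T_out" && ti.contains tout
    then ((PySem.List.remove? ti tout).getD ti, [tout])
    else (ti, [])
  let hum := pick "RH_"
  let humoV : List Int := if idx.contains "RH_out" then [idx.getD "RH_out" 0] else []
  let g : PySem.Dict String (List Int) :=
    ((((PySem.Dict.empty.insert "lights" lightsV).insert "temp_indoor" pr.1).insert
        "temp_outdoor" pr.2).insert "humidity" hum).insert "humidity_outdoor" humoV
  let g := (["Press_mm_hg", "Windspeed", "Visibility", "Tdewpoint", "rv1", "rv2"] : List String).foldl
    (fun g k => g.insert k (if idx.contains k then [idx.getD k 0] else [])) g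
  -- {g: cols for g, cols in groups.items() if len(cols) > 0}: groups' keys are the 11
  -- distinct literals above, so the comprehension is items filtered to non-empty cols
  g.items.filter (fun p => decide (0 < p.2.length))

-- ===== PORT B =====
-- loop body of B's single pass over idx.items(), one component per bucket
def pvBStep (a : List Int × List Int × List Int × List Int × List Int) (p : String × Int) :
    List Int × List Int × List Int × List Int × List Int :=
  (if p.1 == "lights" then a.1 ++ [p.2] else a.1,
   if PySem.Str.startswith p.1 "T" && !(p.1 == "T_out") then a.2.1 ++ [p.2] else a.2.1,
   if PySem.Str.startswith p.1 "T" && (p.1 == "T_out") then a.2.2.1 ++ [p.2] else a.2.2.1,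
   if PySem.Str.startswith p.1 "RH_" then a.2.2.2.1 ++ [p.2] else a.2.2.2.1,
   if PySem.Str.startswith p.1 "RH_" && (p.1 == "RH_out") then a.2.2.2.2 ++ [p.2] else a.2.2.2.2)

def select_feature_groups_alt (names : List String) : List (String × List Int) :=
  let idx : PySem.Dict String Int :=
    (PySem.List.enumerate names).foldl (fun d p => d.insert p.2 p.1) PySem.Dict.empty
  let acc := idx.items.foldl pvBStep ([], [], [], [], [])
  let base : List (String × List Int) :=
    [("lights", acc.1), ("temp_indoor", acc.2.1), ("temp_outdoor", acc.2.2.1),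
     ("humidity", acc.2.2.2.1), ("humidity_outdoor", acc.2.2.2.2)]
  base.filter (fun p => !p.2.isEmpty) ++
    (["Press_mm_hg", "Windspeed", "Visibility", "Tdewpoint", "rv1", "rv2"] : List String).filterMap (fun k => (idx.get? k).map (fun i => (k, [i])))

-- ===== PRECONDITION & SPEC =====
def Spec_select_feature_groups (names : List String) (out : List (String × List Int)) : Prop := out = select_feature_groups_alt names
instance (names : List String) (out : List (String × List Int)) : Decidable (Spec_select_feature_groups names out) := by unfold Spec_select_feature_groups; infer_instance

-- ===== CLAIM (what is proved, stated in full; the proofs are below) =====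
def Claim_equal_select_feature_groups : Prop := ∀ (names : List String), Dom_select_feature_groups names → Spec_select_feature_groups names (select_feature_groups names)

-- ===== LEMMAS AND PROOFS =====

theorem pvFixed (d : PySem.Dict String Int) (ks : List String) :
    (ks.map (fun k => (k, if d.contains k then [d.getD k 0] else []))).filter
        (fun p => decide (0 < p.2.length)) =
      ks.filterMap (fun k => (d.get? k).map (fun i => (k, [i]))) := by
  induction ks with
  | nil => simp
  | cons k t ih =>
      simp only [List.map_cons, List.filter_cons, List.filterMap_cons]
      rcases h : d.get? k with _ | v
      · have hc : d.contains k = false := by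
          rw [PySem.Dict.contains_eq_isSome_get?, h]; rfl
        simp [hc, ih]
      · have hc : d.contains k = true := by
          rw [PySem.Dict.contains_eq_isSome_get?, h]; rfl
        have hg : d.getD k 0 = v := by rw [PySem.Dict.getD_eq_get?_getD, h]; rfl
        simp [hc, hg, ih]

theorem pvFilterKey (l : List (String × Int)) (k : String) (hK : (l.map Prod.fst).Nodup) :
    (l.filter (fun p => p.1 == k)).map (fun p => p.2) =
      (match (List.find? (fun p => p.1 == k) l) with
       | some pr => [pr.2]
       | none => []) := by
  induction l with
  | nil => simp
  | cons h t ih =>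
      simp only [List.map_cons, List.nodup_cons] at hK
      by_cases hb : (h.1 == k) = true
      · have hk : h.1 = k := by exact eq_of_beq hb
        have : t.filter (fun p => p.1 == k) = [] := by
          rw [List.filter_eq_nil_iff]
          intro p hp hpk
          exact hK.1 (by rw [hk, ← eq_of_beq hpk]; exact List.mem_map_of_mem hp)
        simp [hb, this]
      · simp only [List.filter_cons, List.find?_cons, hb]
        simpa using ih hK.2

theorem pvRemoveLemma (l : List (String × Int)) (v : Int)
    (hK : (l.map Prod.fst).Nodup) (hV : (l.map Prod.snd).Nodup) (hm : ("T_out", v) ∈ l) :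
    PySem.List.remove? ((l.filter (fun p => PySem.Str.startswith p.1 "T")).map (fun p => p.2)) v =
      some ((l.filter (fun p => PySem.Str.startswith p.1 "T" && !(p.1 == "T_out"))).map (fun p => p.2)) := by
  induction l with
  | nil => simp at hm
  | cons h t ih =>
      simp only [List.map_cons, List.nodup_cons] at hK hV
      rcases List.mem_cons.mp hm with hh | ht
      · -- h = ("T_out", v)
        subst hh
        have hnone : t.filter (fun p => PySem.Str.startswith p.1 "T" && !(p.1 == "T_out"))
            = t.filter (fun p => PySem.Str.startswith p.1 "T") := by
          apply List.filter_congr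
          intro p hp
          have hb : ¬ (p.1 == "T_out") = true := by
            intro hb
            exact hK.1 (List.mem_map.mpr ⟨p, hp, eq_of_beq hb⟩)
          simp [hb]
        have hsw : PySem.Str.startswith ("T_out" : String) "T" = true := by decide
        simp only [List.filter_cons, hsw, BEq.refl, Bool.not_true, Bool.and_false,
          Bool.false_eq_true, if_false, if_true, List.map_cons]
        rw [PySem.List.remove?_cons_self, hnone]
      · -- ("T_out", v) ∈ t
        have hvne : h.2 ≠ v := by
          intro hh2
          exact hV.1 (hh2 ▸ List.mem_map_of_mem ht)
        have hkne : ¬ (h.1 == "T_out") = true := by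
          intro hb
          refine hK.1 ?_
          exact eq_of_beq hb ▸ List.mem_map_of_mem ht
        have ihe := ih hK.2 hV.2 ht
        have hkf : (h.1 == "T_out") = false := by simpa using hkne
        by_cases hsw : PySem.Str.startswith h.1 "T" = true
        · simp only [List.filter_cons, hsw, hkf, Bool.not_false, Bool.and_true,
            if_true, List.map_cons]
          rw [PySem.List.remove?_cons_of_ne _ hvne, ihe]
          rfl
        · have hsw' : PySem.Str.startswith h.1 "T" = false := by simpa using hsw
          simp only [List.filter_cons, hsw', Bool.false_and, Bool.false_eq_true, if_false]
          exact ihe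

theorem pvMemReplaceVals (t : List (String × Int)) (k : String) (w v : Int)
    (hv : v ∈ (t.map (fun p => if p.1 == k then ((k, w) : String × Int) else p)).map Prod.snd) :
    v = w ∨ v ∈ t.map Prod.snd := by
  simp only [List.map_map, List.mem_map, Function.comp] at hv ⊢
  obtain ⟨p, hp, hpv⟩ := hv
  by_cases hb : (p.1 == k) = true
  · simp [hb] at hpv; left; omega
  · simp [hb] at hpv; right; exact ⟨p, hp, hpv⟩

theorem pvReplaceVals (l : List (String × Int)) (k : String) (w : Int)
    (hK : (l.map Prod.fst).Nodup) (hV : (l.map Prod.snd).Nodup)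
    (hb : ∀ v ∈ l.map Prod.snd, v < w) :
    ((l.map (fun p => if p.1 == k then ((k, w) : String × Int) else p)).map Prod.snd).Nodup ∧
    (∀ v ∈ (l.map (fun p => if p.1 == k then ((k, w) : String × Int) else p)).map Prod.snd, v < w + 1) := by
  induction l with
  | nil => simp
  | cons h t ih =>
      simp only [List.map_cons, List.nodup_cons, List.mem_cons] at hK hV hb ⊢
      have hbt : ∀ v ∈ t.map Prod.snd, v < w := fun v hv => hb v (Or.inr hv)
      by_cases hhk : (h.1 == k) = true
      · have hid : t.map (fun p => if p.1 == k then ((k, w) : String × Int) else p) = t := by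
          conv_rhs => rw [← List.map_id t]
          refine List.map_congr_left (fun p hp => ?_)
          have : ¬ (p.1 == k) = true := by
            intro hb'
            exact hK.1 (List.mem_map.mpr ⟨p, hp, by rw [eq_of_beq hb', eq_of_beq hhk]⟩)
          simp [this]
        simp only [hhk, if_pos, hid]
        refine ⟨⟨fun hw => ?_, hV.2⟩, fun v hv => ?_⟩
        · have := hbt w hw; omega
        · rcases hv with rfl | hv
          · omega
          · have := hbt v hv; omega
      · simp only [hhk, Bool.false_eq_true, if_false]
        obtain ⟨ihn, ihb⟩ := ih hK.2 hV.2 hbt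
        refine ⟨⟨fun hmem => ?_, ihn⟩, fun v hv => ?_⟩
        · rcases pvMemReplaceVals t k w h.2 hmem with hh | hh
          · have := hb h.2 (Or.inl rfl); omega
          · exact hV.1 hh
        · rcases hv with rfl | hv
          · have := hb h.2 (Or.inl rfl); omega
          · exact ihb v hv

theorem pvInsertStep (d : PySem.Dict String Int) (k : String) (w : Int)
    (hK : d.keys.Nodup) (hV : (d.items.map Prod.snd).Nodup)
    (hb : ∀ v ∈ d.items.map Prod.snd, v < w) :
    (d.insert k w).keys.Nodup ∧ ((d.insert k w).items.map Prod.snd).Nodup ∧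
    (∀ v ∈ (d.insert k w).items.map Prod.snd, v < w + 1) := by
  refine ⟨PySem.Dict.nodup_keys_insert d k w hK, ?_⟩
  have hKl : (d.items.map Prod.fst).Nodup := by simpa [PySem.Dict.keys] using hK
  rw [PySem.Dict.items_insert]
  by_cases hc : d.contains k = true
  · simp only [hc, if_true]
    exact pvReplaceVals d.items k w hKl hV hb
  · simp only [hc, Bool.false_eq_true, if_false, List.map_append]
    constructor
    · simp only [List.map_cons, List.map_nil]
      rw [List.nodup_append]
      refine ⟨hV, List.nodup_singleton w, ?_⟩
      intro v hv
      have := hb v hv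
      simp; omega
    · intro v hv
      simp only [List.map_cons, List.map_nil, List.mem_append, List.mem_singleton] at hv
      rcases hv with hv | rfl
      · have := hb v hv; omega
      · omega

theorem pvIdxInvariant (l : List String) (s : Int) (d : PySem.Dict String Int)
    (hK : d.keys.Nodup) (hV : (d.items.map Prod.snd).Nodup)
    (hb : ∀ v ∈ d.items.map Prod.snd, v < s) :
    ((PySem.List.enumerate l s).foldl (fun d p => d.insert p.2 p.1) d).keys.Nodup ∧
    (((PySem.List.enumerate l s).foldl (fun d p => d.insert p.2 p.1) d).items.map Prod.snd).Nodup := by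
  induction l generalizing s d with
  | nil => exact ⟨hK, hV⟩
  | cons x t ih =>
      simp only [PySem.List.enumerate, List.foldl_cons]
      obtain ⟨h1, h2, h3⟩ := pvInsertStep d x s hK hV hb
      exact ih (s + 1) (d.insert x s) h1 h2 h3

theorem pvBFold (l : List (String × Int)) (a b c d e : List Int) :
    l.foldl pvBStep (a, b, c, d, e) =
      (a ++ (l.filter (fun p => p.1 == "lights")).map (fun p => p.2),
       b ++ (l.filter (fun p => PySem.Str.startswith p.1 "T" && !(p.1 == "T_out"))).map (fun p => p.2),
       c ++ (l.filter (fun p => PySem.Str.startswith p.1 "T" && (p.1 == "T_out"))).map (fun p => p.2),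
       d ++ (l.filter (fun p => PySem.Str.startswith p.1 "RH_")).map (fun p => p.2),
       e ++ (l.filter (fun p => PySem.Str.startswith p.1 "RH_" && (p.1 == "RH_out"))).map (fun p => p.2)) := by
  induction l generalizing a b c d e with
  | nil => simp
  | cons h t ih =>
      simp only [List.foldl_cons, pvBStep, ih, List.filter_cons]
      split_ifs <;> simp_all

theorem pvGItems (a b c d e : List Int) :
    (((((PySem.Dict.empty.insert "lights" a).insert "temp_indoor" b).insert
        "temp_outdoor" c).insert "humidity" d).insert "humidity_outdoor" e).items =
      [("lights", a), ("temp_indoor", b), ("temp_outdoor", c), ("humidity", d),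
       ("humidity_outdoor", e)] := by
  simp [PySem.Dict.items_insert, PySem.Dict.empty, PySem.Dict.contains]

theorem pvGFresh (a b c d e : List Int) :
    ∀ k ∈ (["Press_mm_hg", "Windspeed", "Visibility", "Tdewpoint", "rv1", "rv2"] : List String),
    (((((PySem.Dict.empty.insert "lights" a).insert "temp_indoor" b).insert
        "temp_outdoor" c).insert "humidity" d).insert "humidity_outdoor" e).contains k = false := by
  intro k hk
  fin_cases hk <;> simp [PySem.Dict.contains, pvGItems]

theorem pvKeyGroup (d : PySem.Dict String Int) (k : String) (hK : d.keys.Nodup) :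
    (d.items.filter (fun p => p.1 == k)).map (fun p => p.2) =
      if d.contains k then [d.getD k 0] else [] := by
  have hKl : (d.items.map Prod.fst).Nodup := by simpa [PySem.Dict.keys] using hK
  rw [pvFilterKey _ _ hKl]
  rcases h : List.find? (fun p => p.1 == k) d.items with _ | pr
  · have hc : d.contains k = false := by
      rw [Bool.eq_false_iff]
      simp only [PySem.Dict.contains, ne_eq, List.any_eq_true, not_exists, not_and]
      intro p hp
      simpa using List.find?_eq_none.mp h p hp
    simp [hc, h]
  · have hc : d.contains k = true := by
      simp only [PySem.Dict.contains, List.any_eq_true]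
      exact ⟨pr, List.mem_of_find?_eq_some h, by simpa using List.find?_some h⟩
    have hg : d.getD k 0 = pr.2 := by
      rw [PySem.Dict.getD_eq_get?_getD]
      simp [PySem.Dict.get?, h]
    simp [hc, hg, h]

-- ===== PORT A =====
-- the six fixed keys of A's final for-loop

theorem pvMain (names : List String) :
    select_feature_groups names = select_feature_groups_alt names := by
  unfold select_feature_groups select_feature_groups_alt
  set idx := (PySem.List.enumerate names).foldl (fun d p => d.insert p.2 p.1)
      PySem.Dict.empty with hidx
  obtain ⟨hK, hVl⟩ := pvIdxInvariant names 0 PySem.Dict.empty (by simp [PySem.Dict.keys, PySem.Dict.empty])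
    (by simp [PySem.Dict.empty]) (by simp [PySem.Dict.empty])
  rw [← hidx] at hK hVl
  have hKl : (idx.items.map Prod.fst).Nodup := by simpa [PySem.Dict.keys] using hK
  dsimp only
  rw [pvBFold, PySem.Dict.items_foldl_insert_fresh _ (fun k => k)
      (fun k => if idx.contains k = true then [idx.getD k 0] else []) _
      (pvGFresh _ _ _ _ _) (by simp),
    pvGItems, List.nil_append, List.nil_append, List.nil_append,
    List.nil_append, List.nil_append, List.filter_append, pvFixed]
  dsimp only
  congr 1
  -- five-group block: same predicate, then componentwise equal
  rw [show (fun p : String × List Int => decide (0 < p.2.length)) =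
        (fun p => !p.2.isEmpty) by funext p; cases p.2 <;> simp]
  -- lights
  have e1 : (if idx.contains "lights" = true then [idx.getD "lights" 0] else []) =
      (idx.items.filter (fun p => p.1 == "lights")).map (fun p => p.2) :=
    (pvKeyGroup idx "lights" hK).symm
  -- temp_outdoor filter is a key filter
  have hto : idx.items.filter (fun p => PySem.Str.startswith p.1 "T" && (p.1 == "T_out")) =
      idx.items.filter (fun p => p.1 == "T_out") := by
    refine List.filter_congr (fun p _ => ?_)
    by_cases h : (p.1 == "T_out") = true
    · rw [eq_of_beq h]; decide
    · simp [h]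
  have hho : idx.items.filter (fun p => PySem.Str.startswith p.1 "RH_" && (p.1 == "RH_out")) =
      idx.items.filter (fun p => p.1 == "RH_out") := by
    refine List.filter_congr (fun p _ => ?_)
    by_cases h : (p.1 == "RH_out") = true
    · rw [eq_of_beq h]; decide
    · simp [h]
  have e5 : (if idx.contains "RH_out" = true then [idx.getD "RH_out" 0] else []) =
      (idx.items.filter (fun p => PySem.Str.startswith p.1 "RH_" && (p.1 == "RH_out"))).map
        (fun p => p.2) := by
    rw [hho, pvKeyGroup idx "RH_out" hK]
  by_cases hc : idx.contains "T_out" = true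
  · -- 'T_out' present: A removes it from temp_indoor and makes its own group
    obtain ⟨v, hv⟩ : ∃ v, idx.get? "T_out" = some v := by
      rw [PySem.Dict.contains_eq_isSome_get?] at hc
      exact Option.isSome_iff_exists.mp hc
    have htout : idx.getD "T_out" 0 = v := by rw [PySem.Dict.getD_eq_get?_getD, hv]; rfl
    have hmem : ("T_out", v) ∈ idx.items := PySem.Dict.mem_items_of_get?_eq_some _ hv
    have hvti : v ∈ (idx.items.filter (fun p => PySem.Str.startswith p.1 "T")).map
        (fun p => p.2) :=
      List.mem_map.mpr ⟨("T_out", v), List.mem_filter.mpr ⟨hmem,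
        show PySem.Str.startswith "T_out" "T" = true by decide⟩, rfl⟩
    have hguard : (idx.contains "T_out" &&
        ((idx.items.filter (fun p => PySem.Str.startswith p.1 "T")).map
          (fun p => p.2)).contains (idx.getD "T_out" 0)) = true := by
      rw [hc, htout, Bool.true_and]
      exact List.elem_eq_true_of_mem hvti
    rw [hguard]
    have e2 : ((PySem.List.remove? ((idx.items.filter
          (fun p => PySem.Str.startswith p.1 "T")).map (fun p => p.2))
          (idx.getD "T_out" 0)).getD ((idx.items.filter
          (fun p => PySem.Str.startswith p.1 "T")).map (fun p => p.2))) =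
        (idx.items.filter (fun p => PySem.Str.startswith p.1 "T" && !(p.1 == "T_out"))).map
          (fun p => p.2) := by
      rw [htout, pvRemoveLemma idx.items v hKl hVl hmem]; rfl
    have e3 : [idx.getD "T_out" 0] =
        (idx.items.filter (fun p => PySem.Str.startswith p.1 "T" && (p.1 == "T_out"))).map
          (fun p => p.2) := by
      rw [hto, pvKeyGroup idx "T_out" hK, if_pos hc]
    rw [e1, e5, ← e2, ← e3]
    simp
  · -- 'T_out' absent
    have hc' : idx.contains "T_out" = false := by simpa using hc
    have hguard : (idx.contains "T_out" &&
        ((idx.items.filter (fun p => PySem.Str.startswith p.1 "T")).map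
          (fun p => p.2)).contains (idx.getD "T_out" 0)) = false := by
      rw [hc', Bool.false_and]
    rw [hguard]
    have hnok : ∀ p ∈ idx.items, ¬ (p.1 == "T_out") = true := by
      intro p hp hb
      rw [Bool.eq_false_iff] at hc'
      exact hc' (PySem.Dict.contains_iff_mem_keys idx "T_out" |>.mpr
        (eq_of_beq hb ▸ PySem.Dict.mem_keys_of_mem_items _ hp))
    have e2 : idx.items.filter (fun p => PySem.Str.startswith p.1 "T" && !(p.1 == "T_out")) =
        idx.items.filter (fun p => PySem.Str.startswith p.1 "T") := by
      refine List.filter_congr (fun p hp => ?_)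
      simp [Bool.eq_false_iff.mpr (hnok p hp)]
    have e3 : idx.items.filter (fun p => PySem.Str.startswith p.1 "T" && (p.1 == "T_out")) =
        [] := by
      rw [List.filter_eq_nil_iff]
      intro p hp
      simp [Bool.eq_false_iff.mpr (hnok p hp)]
    rw [e1, e5, e2, e3]
    simp

-- ===== VERDICT (by name: the statement is the Claim_ definition above) =====
theorem select_feature_groups_spec : Claim_equal_select_feature_groups := by
  intro names _
  show select_feature_groups names = select_feature_groups_alt names
  exact pvMain names
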